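-- pv_equiv track=rewrite | github.com/soumithbabburi/cipherq-neurorepurpose | dynamic_literature_optimizer.py | _deduplicate_and_rank_alzheimer_strategies
-- ===== SOURCE A (Python) =====
-- from typing import Dict, List, Any, Optional, Tuple
--
-- def _deduplicate_and_rank_alzheimer_strategies(strategies: List[Dict]) -> List[Dict]:
--     """Remove duplicates and rank by Alzheimer's relevance and evidence level"""
--     unique_strategies = {}
--
--     for strategy in strategies:
--         area = strategy.get('area', '')
--         if area not in unique_strategies:
--             unique_strategies[area] = strategy
--         else:
--             # Keep the one with higher evidence level or Alzheimer's relevance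
--             existing = unique_strategies[area]
--             if (strategy.get('alzheimer_relevance') == 'High' and
--                 existing.get('alzheimer_relevance') != 'High'):
--                 unique_strategies[area] = strategy
--
--     # Sort by Alzheimer's relevance and evidence level
--     strategy_list = list(unique_strategies.values())
--     strategy_list.sort(key=lambda x: (
--         0 if x.get('alzheimer_relevance') == 'High' else 1,
--         0 if 'High' in x.get('evidence_level', '') else 1
--     ))
--
--     return strategy_list
-- ===== SOURCE B (Python) =====
-- def _deduplicate_and_rank_alzheimer_strategies(strategies):
--     """Group strategies by area, pick one representative per group, then rank."""
--     groups = {}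
--     for s in strategies:
--         groups.setdefault(s.get('area', ''), []).append(s)
--     reps = [next((s for s in g if s.get('alzheimer_relevance') == 'High'), g[0])
--             for g in groups.values()]
--     reps.sort(key=lambda x: (
--         0 if x.get('alzheimer_relevance') == 'High' else 1,
--         0 if 'High' in x.get('evidence_level', '') else 1
--     ))
--     return reps
-- ===== Notes on version B (the rewrite author's own statement) =====
-- stated objective: alternative
-- what changed: Replaces A's running-winner dict pass (conditionally overwriting one kept strategy per area) with a group-then-reduce decomposition: build area->list-of-strategies groups in one pass, then pick each group's first 'High'-relevance member (else its first member), then the same stable two-key sort.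
import Mathlib
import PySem

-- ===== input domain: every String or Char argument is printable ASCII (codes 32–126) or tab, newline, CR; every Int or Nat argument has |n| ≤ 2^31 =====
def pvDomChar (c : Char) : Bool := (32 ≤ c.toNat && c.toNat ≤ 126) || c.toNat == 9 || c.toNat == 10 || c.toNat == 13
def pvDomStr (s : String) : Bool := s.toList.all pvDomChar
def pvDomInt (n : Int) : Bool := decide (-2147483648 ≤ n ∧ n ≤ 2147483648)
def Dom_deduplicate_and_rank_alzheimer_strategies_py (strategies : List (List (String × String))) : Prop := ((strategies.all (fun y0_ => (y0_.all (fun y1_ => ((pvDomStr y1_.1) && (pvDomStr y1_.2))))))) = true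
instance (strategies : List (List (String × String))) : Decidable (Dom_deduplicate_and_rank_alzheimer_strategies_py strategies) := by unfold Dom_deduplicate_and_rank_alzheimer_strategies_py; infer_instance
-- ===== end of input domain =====

-- B replaces A's running-winner dict pass with a group-by-area pass followed by a per-group
-- representative selection (first 'High'-relevance member, else the group's first member); same stable sort.

-- shared small helpers: Python's strategy.get(key[, default]) and the two sort-key components
def pvGet? (s : List (String × String)) (k : String) : Option String := (PySem.Dict.ofList s).get? k
def pvGetD (s : List (String × String)) (k dflt : String) : String := (PySem.Dict.ofList s).getD k dflt
def pvIsHigh (s : List (String × String)) : Bool := pvGet? s "alzheimer_relevance" == some "High"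
def pvKey1 (x : List (String × String)) : Int := if pvGet? x "alzheimer_relevance" == some "High" then 0 else 1
def pvKey2 (x : List (String × String)) : Int := if PySem.Str.isIn "High" (pvGetD x "evidence_level" "") then 0 else 1

-- ===== PORT A =====
def pvStepA (d : PySem.Dict String (List (String × String))) (strategy : List (String × String)) :
    PySem.Dict String (List (String × String)) :=
  let area := pvGetD strategy "area" ""
  if !(d.contains area) then
    d.insert area strategy
  else
    let existing := d.getD area []
    if pvIsHigh strategy && !(pvIsHigh existing) then
      d.insert area strategy
    else
      d

def deduplicate_and_rank_alzheimer_strategies_py (strategies : List (List (String × String))) : List (List (String × String)) :=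
  let unique_strategies := strategies.foldl pvStepA PySem.Dict.empty
  PySem.List.sorted2 unique_strategies.values pvKey1 pvKey2

-- ===== PORT B =====
def pvStepB (d : PySem.Dict String (List (List (String × String)))) (s : List (String × String)) :
    PySem.Dict String (List (List (String × String))) :=
  d.modify (pvGetD s "area" "") [] (· ++ [s])

-- next((s for s in g if s.get('alzheimer_relevance') == 'High'), g[0])
def pvPick (g : List (List (String × String))) : List (String × String) :=
  match g.find? pvIsHigh with
  | some s => s
  | none => g.headD []

def deduplicate_and_rank_alzheimer_strategies_py_alt (strategies : List (List (String × String))) : List (List (String × String)) :=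
  let groups := strategies.foldl pvStepB PySem.Dict.empty
  let reps := groups.values.map pvPick
  PySem.List.sorted2 reps pvKey1 pvKey2

-- ===== PRECONDITION & SPEC =====
def Spec_deduplicate_and_rank_alzheimer_strategies_py (strategies : List (List (String × String))) (out : List (List (String × String))) : Prop := out = deduplicate_and_rank_alzheimer_strategies_py_alt strategies
instance (strategies : List (List (String × String))) (out : List (List (String × String))) : Decidable (Spec_deduplicate_and_rank_alzheimer_strategies_py strategies out) := by unfold Spec_deduplicate_and_rank_alzheimer_strategies_py; infer_instance

-- ===== CLAIM (what is proved, stated in full; the proofs are below) =====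
def Claim_equal_deduplicate_and_rank_alzheimer_strategies_py : Prop := ∀ (strategies : List (List (String × String))), Dom_deduplicate_and_rank_alzheimer_strategies_py strategies → Spec_deduplicate_and_rank_alzheimer_strategies_py strategies (deduplicate_and_rank_alzheimer_strategies_py strategies)

-- ===== LEMMAS AND PROOFS =====

-- ===== VERDICT (by name: the statement is the Claim_ definition above) =====
lemma pvPick_singleton (s : List (String × String)) : pvPick [s] = s := by
  unfold pvPick
  cases h : pvIsHigh s <;> simp [List.find?, h]

lemma pvPick_append {g : List (List (String × String))} (hg : g ≠ []) (s : List (String × String)) :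
    pvPick (g ++ [s]) = if pvIsHigh s && !(pvIsHigh (pvPick g)) then s else pvPick g := by
  unfold pvPick
  rw [List.find?_append]
  cases hf : g.find? pvIsHigh with
  | some w =>
    have hw : pvIsHigh w = true := List.find?_some hf
    simp [hw]
  | none =>
    have hall : ∀ x ∈ g, pvIsHigh x = false := by
      intro x hx
      simpa using List.find?_eq_none.mp hf x hx
    cases g with
    | nil => exact absurd rfl hg
    | cons a t =>
      have ha : pvIsHigh a = false := hall a (by simp)
      cases hs : pvIsHigh s with
      | true => simp [List.find?, hs, ha]
      | false => simp [List.find?, hs, ha]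

lemma pvLoop_items (l : List (List (String × String)))
    (dA : PySem.Dict String (List (String × String)))
    (dB : PySem.Dict String (List (List (String × String))))
    (h : dA.items = dB.items.map (fun p => (p.1, pvPick p.2)))
    (hne : ∀ p ∈ dB.items, p.2 ≠ [])
    (hnd : dB.keys.Nodup) :
    (l.foldl pvStepA dA).items = (l.foldl pvStepB dB).items.map (fun p => (p.1, pvPick p.2)) := by
  induction l generalizing dA dB with
  | nil => exact h
  | cons s t ih =>
    simp only [List.foldl_cons]
    have hkeys : dA.keys = dB.keys := by
      simp only [PySem.Dict.keys, h, List.map_map]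
      rfl
    have hmod : pvStepB dB s = dB.insert (pvGetD s "area" "") (dB.getD (pvGetD s "area" "") [] ++ [s]) := rfl
    cases hcB : dB.contains (pvGetD s "area" "") with
    | false =>
      have hcA : dA.contains (pvGetD s "area" "") = false := by
        rw [PySem.Dict.contains_eq_decide_mem_keys, hkeys, ← PySem.Dict.contains_eq_decide_mem_keys]
        exact hcB
      have hA : pvStepA dA s = dA.insert (pvGetD s "area" "") s := by
        simp [pvStepA, hcA]
      have hB : pvStepB dB s = dB.insert (pvGetD s "area" "") [s] := by
        rw [hmod, PySem.Dict.getD_of_not_contains _ _ hcB]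
        rfl
      rw [hA, hB]
      apply ih
      · rw [PySem.Dict.items_insert_of_not_contains _ _ hcA,
          PySem.Dict.items_insert_of_not_contains _ _ hcB, List.map_append, h]
        simp [pvPick_singleton]
      · intro p hp
        rw [PySem.Dict.items_insert_of_not_contains _ _ hcB] at hp
        rcases (List.mem_append.mp hp) with hp | hp
        · exact hne p hp
        · simp at hp; subst hp; simp
      · rw [PySem.Dict.keys_insert_of_not_contains _ _ hcB]
        refine List.Nodup.append hnd (by simp) ?_
        intro x hx hx'
        simp at hx'; subst hx'
        exact absurd ((PySem.Dict.contains_iff_mem_keys _ _).mpr hx) (by simp [hcB])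
    | true =>
      obtain ⟨g, hg⟩ : ∃ g, dB.get? (pvGetD s "area" "") = some g := by
        have := PySem.Dict.contains_eq_isSome_get? dB (pvGetD s "area" "")
        rw [hcB] at this
        exact Option.isSome_iff_exists.mp this.symm
      have hgmem : (pvGetD s "area" "", g) ∈ dB.items := PySem.Dict.mem_items_of_get?_eq_some _ hg
      have gne : g ≠ [] := hne _ hgmem
      have hndA : dA.keys.Nodup := by rw [hkeys]; exact hnd
      have hAmem : (pvGetD s "area" "", pvPick g) ∈ dA.items := by
        rw [h]
        exact List.mem_map_of_mem hgmem
      have hex : dA.getD (pvGetD s "area" "") [] = pvPick g :=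
        PySem.Dict.getD_of_mem_items _ hAmem hndA []
      have hcA : dA.contains (pvGetD s "area" "") = true := by
        rw [PySem.Dict.contains_eq_decide_mem_keys, hkeys, ← PySem.Dict.contains_eq_decide_mem_keys]
        exact hcB
      have hB : pvStepB dB s = dB.insert (pvGetD s "area" "") (g ++ [s]) := by
        have hg2 : dB.getD (pvGetD s "area" "") [] = g := by
          rw [PySem.Dict.getD_eq_get?_getD, hg]; rfl
        rw [hmod, hg2]
      have hitemsB : (pvStepB dB s).items
          = dB.items.map (fun p => if p.1 == pvGetD s "area" "" then (pvGetD s "area" "", g ++ [s]) else p) := by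
        rw [hB, PySem.Dict.items_insert_of_contains _ _ hcB]
      have hval_at : ∀ p ∈ dB.items, p.1 = pvGetD s "area" "" → p.2 = g := by
        intro p hp hp1
        have := PySem.Dict.get?_of_mem_items _ hp hnd
        rw [hp1, hg] at this
        exact (Option.some_inj.mp this).symm
      have hitems' : (pvStepA dA s).items = (pvStepB dB s).items.map (fun p => (p.1, pvPick p.2)) := by
        rw [hitemsB, List.map_map]
        cases hcond : pvIsHigh s && !(pvIsHigh (pvPick g)) with
        | true =>
          have hA : pvStepA dA s = dA.insert (pvGetD s "area" "") s := by
            simp [pvStepA, hcA, hex, hcond]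
          rw [hA, PySem.Dict.items_insert_of_contains _ _ hcA, h, List.map_map]
          apply List.map_congr_left
          intro p hp
          by_cases hp1 : p.1 = pvGetD s "area" ""
          · simp [hp1, pvPick_append gne, hcond]
          · simp [hp1]
        | false =>
          have hA : pvStepA dA s = dA := by
            simp [pvStepA, hcA, hex, hcond]
          rw [hA, h]
          apply List.map_congr_left
          intro p hp
          by_cases hp1 : p.1 = pvGetD s "area" ""
          · have hp2 := hval_at p hp hp1
            simp [hp1, hp2, pvPick_append gne, hcond]
          · simp [hp1]
      apply ih _ _ hitems'
      · intro p hp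
        rw [hitemsB] at hp
        obtain ⟨q, hq, hqe⟩ := List.mem_map.mp hp
        by_cases hq1 : q.1 = pvGetD s "area" ""
        · rw [if_pos (by simp [hq1])] at hqe
          rw [← hqe]; simp
        · rw [if_neg (by simp [hq1])] at hqe
          rw [← hqe]; exact hne q hq
      · have : (pvStepB dB s).keys = dB.keys := by
          rw [hB]
          exact PySem.Dict.keys_insert_of_contains _ _ hcB
        rw [this]; exact hnd

theorem deduplicate_and_rank_alzheimer_strategies_py_spec : Claim_equal_deduplicate_and_rank_alzheimer_strategies_py := by
  intro strategies _
  unfold Spec_deduplicate_and_rank_alzheimer_strategies_py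
  unfold deduplicate_and_rank_alzheimer_strategies_py deduplicate_and_rank_alzheimer_strategies_py_alt
  have hitems := pvLoop_items strategies PySem.Dict.empty PySem.Dict.empty (by rfl)
    (by intro p hp; simp [PySem.Dict.empty] at hp) (by simp)
  have hvals : (strategies.foldl pvStepA PySem.Dict.empty).values
      = ((strategies.foldl pvStepB PySem.Dict.empty).values).map pvPick := by
    simp only [PySem.Dict.values, hitems, List.map_map]
    rfl
  show PySem.List.sorted2 (List.foldl pvStepA PySem.Dict.empty strategies).values pvKey1 pvKey2
      = PySem.List.sorted2 ((List.foldl pvStepB PySem.Dict.empty strategies).values.map pvPick) pvKey1 pvKey2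
  rw [hvals]
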